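-- pv_equiv track=rewrite | github.com/Aghon5304/pp1 | 09-Test2/mock/p3.py | f
-- ===== SOURCE A (Python) =====
-- def f(array2D):
--     isTrue=True
--     for y in range(len(array2D)):
--         sumRow=0
--         sumColumn=0
--         for x in range(len(array2D)):
--             sumRow+=array2D[x][y]
--             sumColumn+=array2D[y][x]
--         if(sumColumn!=sumRow):
--             isTrue=False
--
--     return isTrue
-- ===== SOURCE B (Python) =====
-- def f(array2D):
--     n = len(array2D)
--     d = [0] * n
--     for y in range(n):
--         for x in range(y):
--             t = array2D[y][x] - array2D[x][y]
--             d[y] += t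
--             d[x] -= t
--     return not any(d)
-- ===== Notes on version B (the rewrite author's own statement) =====
-- stated objective: alternative
-- what changed: B accumulates an antisymmetry-defect array: it visits each unordered index pair x<y of the leading n x n submatrix once, adds t = a[y][x]-a[x][y] to cell y and subtracts it from cell x, and finally checks the array is all zeros (row sum = column sum at index k iff the antisymmetric part summed against k vanishes); A instead recomputes a full row sum and column sum for every index in an interleaved loop with a flag.
import Mathlib
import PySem

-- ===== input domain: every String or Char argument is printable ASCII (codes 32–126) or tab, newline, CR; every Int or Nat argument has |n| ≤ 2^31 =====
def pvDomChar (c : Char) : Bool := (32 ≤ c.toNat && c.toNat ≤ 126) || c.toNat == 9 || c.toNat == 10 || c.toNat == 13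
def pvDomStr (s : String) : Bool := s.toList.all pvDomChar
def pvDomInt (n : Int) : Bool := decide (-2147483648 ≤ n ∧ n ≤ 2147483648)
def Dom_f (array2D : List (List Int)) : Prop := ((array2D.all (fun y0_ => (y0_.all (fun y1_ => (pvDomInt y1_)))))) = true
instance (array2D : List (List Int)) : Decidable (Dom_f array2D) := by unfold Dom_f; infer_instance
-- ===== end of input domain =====

-- B checks row sum = column sum via the antisymmetric part: one pass over unordered index
-- pairs x<y accumulating a[y][x]-a[x][y] into a defect array, then tests it for all zeros;
-- objective: alternative (each off-diagonal entry is read once instead of twice).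


-- ===== PORT A =====
-- array2D[x][y]: inside Pre_f every index is in range, so the pyGetD defaults are never taken.
def f (array2D : List (List Int)) : Bool :=
  (PySem.List.pyRange 0 (array2D.length : Int) 1).foldl (fun isTrue y =>
    let p := (PySem.List.pyRange 0 (array2D.length : Int) 1).foldl
      (fun (s : Int × Int) x =>
        (s.1 + PySem.List.pyGetD (PySem.List.pyGetD array2D x []) y 0,
         s.2 + PySem.List.pyGetD (PySem.List.pyGetD array2D y []) x 0))
      (0, 0)
    if p.2 ≠ p.1 then false else isTrue) true

-- ===== PORT B =====
def f_alt (array2D : List (List Int)) : Bool :=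
  let n := array2D.length
  let d := (PySem.List.pyRange 0 (n : Int) 1).foldl (fun d y =>
      (PySem.List.pyRange 0 y 1).foldl (fun d x =>
        let t := PySem.List.pyGetD (PySem.List.pyGetD array2D y []) x 0
               - PySem.List.pyGetD (PySem.List.pyGetD array2D x []) y 0
        let d1 := PySem.List.pySetD d y (PySem.List.pyGetD d y 0 + t)
        PySem.List.pySetD d1 x (PySem.List.pyGetD d1 x 0 - t)) d)
    (List.replicate n (0 : Int))
  !(d.any (fun v => v != 0))

-- ===== PRECONDITION & SPEC =====
-- Pre_f excludes ragged inputs on which Python's array2D[x][y] raises IndexError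
-- (some of the first n rows shorter than n): A raises there.
def Pre_f (array2D : List (List Int)) : Prop :=
  ∀ row ∈ array2D, array2D.length ≤ row.length
instance (array2D : List (List Int)) : Decidable (Pre_f array2D) := by unfold Pre_f; infer_instance

def pvWitness_f : List (List Int) := [[1, 2], [3, 4]]

def Spec_f (array2D : List (List Int)) (out : Bool) : Prop := out = f_alt array2D
instance (array2D : List (List Int)) (out : Bool) : Decidable (Spec_f array2D out) := by unfold Spec_f; infer_instance

-- ===== CLAIM (what is proved, stated in full; the proofs are below) =====
def Claim_equal_f : Prop := ∀ (array2D : List (List Int)), Dom_f array2D → Pre_f array2D → Spec_f array2D (f array2D)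

-- ===== LEMMAS AND PROOFS =====

-- a[y][x] as the ports read it (Nat indices)
def gA (a : List (List Int)) (y x : Nat) : Int :=
  PySem.List.pyGetD (PySem.List.pyGetD a (y : Int) []) (x : Int) 0

-- antisymmetric part t(y,x) = a[y][x] - a[x][y]
def tA (a : List (List Int)) (y x : Nat) : Int := gA a y x - gA a x y

-- partial defect sum Σ_{x<m} t(k,x)
def sS (a : List (List Int)) (k m : Nat) : Int :=
  ((List.range m).map (fun x => tA a k x)).sum

theorem tA_self (a : List (List Int)) (k : Nat) : tA a k k = 0 := by
  simp [tA]

theorem tA_antisymm (a : List (List Int)) (y k : Nat) : tA a y k = -(tA a k y) := by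
  simp [tA]

theorem sS_succ (a : List (List Int)) (k m : Nat) :
    sS a k (m + 1) = sS a k m + tA a k m := by
  simp [sS, List.range_succ]

-- B's inner loop body, in Nat-indexed form
def stepB (a : List (List Int)) (y : Nat) (d : List Int) (x : Nat) : List Int :=
  let t := tA a y x
  let d1 := d.set y (d.getD y 0 + t)
  d1.set x (d1.getD x 0 - t)

theorem getD_set (d : List Int) (i : Nat) (v : Int) (k : Nat) (hi : i < d.length) :
    (d.set i v).getD k 0 = if k = i then v else d.getD k 0 := by
  simp only [List.getD_eq_getElem?_getD, List.getElem?_set]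
  rcases eq_or_ne i k with h | h
  · subst h; simp [hi]
  · simp [h, Ne.symm h]

-- the inner loop: starting from d, folding stepB y over range j (j ≤ y < d.length)
theorem inner_invariant (a : List (List Int)) (y j : Nat) (d : List Int)
    (hj : j ≤ y) (hy : y < d.length) :
    ((List.range j).foldl (stepB a y) d).length = d.length ∧
    ∀ k, ((List.range j).foldl (stepB a y) d).getD k 0 =
      if k = y then d.getD y 0 + sS a y j
      else if k < j then d.getD k 0 - tA a y k
      else d.getD k 0 := by
  induction j with
  | zero => simp [sS]
  | succ j ih =>
    obtain ⟨hlen, hval⟩ := ih (Nat.le_of_succ_le hj)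
    rw [List.range_succ, List.foldl_append, List.foldl_cons, List.foldl_nil]
    set F := (List.range j).foldl (stepB a y) d with hF
    have hjy : j < y := hj
    have hjlen : j < F.length := by omega
    have hylen : y < F.length := by omega
    constructor
    · simp only [stepB, List.length_set]
      exact hlen
    · intro k
      have hFy : F.getD y 0 = d.getD y 0 + sS a y j := by
        rw [hval y]; simp
      have hFj : F.getD j 0 = d.getD j 0 := by
        rw [hval j]; simp [Nat.ne_of_lt hjy]
      simp only [stepB]
      set G := F.set y (F.getD y 0 + tA a y j) with hGdef
      have hGlen : G.length = F.length := by simp [hGdef]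
      have hG : ∀ k, G.getD k 0 = if k = y then F.getD y 0 + tA a y j else F.getD k 0 :=
        fun k => getD_set F y _ k hylen
      rw [getD_set G j _ k (by omega)]
      rcases eq_or_ne k j with hkj | hkj
      · subst hkj
        rw [if_pos rfl, hG k, if_neg (Nat.ne_of_lt hjy), hFj,
            if_neg (Nat.ne_of_lt hjy), if_pos (Nat.lt_succ_self k)]
      · rw [if_neg hkj, hG k]
        rcases eq_or_ne k y with hky | hky
        · subst hky
          rw [if_pos rfl, if_pos rfl, hFy, sS_succ]
          ring
        · rw [if_neg hky, if_neg hky, hval k, if_neg hky]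
          by_cases hk : k < j
          · rw [if_pos hk, if_pos (Nat.lt_succ_of_lt hk)]
          · rw [if_neg hk, if_neg (by omega)]

-- the outer loop on the zero array
theorem outer_invariant (a : List (List Int)) (m : Nat) (hm : m ≤ a.length) :
    ((List.range m).foldl (fun d y => (List.range y).foldl (stepB a y) d)
        (List.replicate a.length (0 : Int))).length = a.length ∧
    ∀ k, ((List.range m).foldl (fun d y => (List.range y).foldl (stepB a y) d)
        (List.replicate a.length (0 : Int))).getD k 0 =
      if k < m then sS a k m else 0 := by
  induction m with
  | zero => simp
  | succ m ih =>
    obtain ⟨hlen, hval⟩ := ih (Nat.le_of_succ_le hm)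
    rw [List.range_succ, List.foldl_append, List.foldl_cons, List.foldl_nil]
    set D := (List.range m).foldl (fun d y => (List.range y).foldl (stepB a y) d)
        (List.replicate a.length (0 : Int)) with hD
    have hmlen : m < D.length := by omega
    obtain ⟨hlen', hval'⟩ := inner_invariant a m m D (le_refl m) hmlen
    refine ⟨by omega, ?_⟩
    intro k
    rw [hval' k]
    rcases eq_or_ne k m with hkm | hkm
    · subst hkm
      rw [hval k]
      simp [sS_succ, tA_self]
    · by_cases hk : k < m
      · rw [hval k]
        simp only [hkm, if_false, hk, if_true]
        have : k < m + 1 := by omega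
        rw [if_pos this, sS_succ, tA_antisymm]
        ring
      · rw [hval k]
        have h1 : ¬ k < m + 1 := by omega
        simp [hkm, hk, h1]

-- difference of mapped sums is the sum of pointwise differences
theorem sum_map_sub {α : Type} (l : List α) (g h : α → Int) :
    (l.map g).sum - (l.map h).sum = (l.map (fun x => g x - h x)).sum := by
  induction l with
  | nil => simp
  | cons hd tl ih => simp [← ih]; ring

-- foldl-sum over a range is the mapped sum
theorem foldl_add_eq_sum (h : Nat → Int) (m : Nat) :
    (List.range m).foldl (fun s x => s + h x) 0 = ((List.range m).map h).sum := by
  induction m with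
  | zero => rfl
  | succ m ih => simp [List.range_succ, ih]

-- A's paired inner fold is the pair of the two single folds.
theorem foldl_pair {α : Type} (g h : α → Int) (l : List α) (p q : Int) :
    l.foldl (fun (s : Int × Int) x => (s.1 + g x, s.2 + h x)) (p, q)
      = (l.foldl (fun s x => s + g x) p, l.foldl (fun s x => s + h x) q) := by
  induction l generalizing p q with
  | nil => rfl
  | cons hd tl ih => simp [List.foldl_cons, ih]

-- A's flag loop is an `all` over the index list.
theorem foldl_flag (a : List (List Int)) (l : List Int) (b : Bool) :
    l.foldl (fun isTrue y =>
      let p := (PySem.List.pyRange 0 (a.length : Int) 1).foldl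
        (fun (s : Int × Int) x =>
          (s.1 + PySem.List.pyGetD (PySem.List.pyGetD a x []) y 0,
           s.2 + PySem.List.pyGetD (PySem.List.pyGetD a y []) x 0))
        (0, 0)
      if p.2 ≠ p.1 then false else isTrue) b
    = (b && l.all (fun y =>
        ((PySem.List.pyRange 0 (a.length : Int) 1).foldl
          (fun s x => s + PySem.List.pyGetD (PySem.List.pyGetD a y []) x 0) 0)
        == ((PySem.List.pyRange 0 (a.length : Int) 1).foldl
          (fun s x => s + PySem.List.pyGetD (PySem.List.pyGetD a x []) y 0) 0))) := by
  induction l generalizing b with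
  | nil => simp
  | cons hd tl ih =>
    rw [List.foldl_cons, ih, List.all_cons]
    rw [foldl_pair]
    by_cases h : (PySem.List.pyRange 0 (a.length : Int) 1).foldl
        (fun s x => s + PySem.List.pyGetD (PySem.List.pyGetD a hd []) x 0) 0
      = (PySem.List.pyRange 0 (a.length : Int) 1).foldl
        (fun s x => s + PySem.List.pyGetD (PySem.List.pyGetD a x []) hd 0) 0
    · simp [h]
    · simp [h]


-- the per-index condition of A, reduced to the defect sum
theorem rowcol_iff_defect (a : List (List Int)) (k : Nat) :
    (((List.range a.length).map (fun (k : Nat) => (k : Int))).foldl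
        (fun s x => s + PySem.List.pyGetD (PySem.List.pyGetD a (k : Int) []) x 0) 0
      = ((List.range a.length).map (fun (k : Nat) => (k : Int))).foldl
        (fun s x => s + PySem.List.pyGetD (PySem.List.pyGetD a x []) (k : Int) 0) 0)
    ↔ sS a k a.length = 0 := by
  rw [List.foldl_map, List.foldl_map, foldl_add_eq_sum, foldl_add_eq_sum]
  unfold sS tA gA
  rw [← sub_eq_zero, sum_map_sub]

-- f in terms of the defect sums
theorem f_eq_defect (a : List (List Int)) :
    f a = ((List.range a.length).all (fun k => sS a k a.length == 0)) := by
  unfold f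
  rw [foldl_flag, Bool.true_and]
  rw [PySem.List.pyRange_zero_nat, List.all_map]
  congr 1
  funext k
  simp only [Function.comp_apply]
  rw [Bool.eq_iff_iff]
  simp only [beq_iff_eq]
  exact rowcol_iff_defect a k

-- B's port body, after index casts, is stepB
theorem stepB_eq (a : List (List Int)) (y x : Nat) (d : List Int) :
    PySem.List.pySetD
      (PySem.List.pySetD d (y : Int)
        (PySem.List.pyGetD d (y : Int) 0 +
          (PySem.List.pyGetD (PySem.List.pyGetD a (y : Int) []) (x : Int) 0 -
            PySem.List.pyGetD (PySem.List.pyGetD a (x : Int) []) (y : Int) 0)))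
      (x : Int)
      (PySem.List.pyGetD
        (PySem.List.pySetD d (y : Int)
          (PySem.List.pyGetD d (y : Int) 0 +
            (PySem.List.pyGetD (PySem.List.pyGetD a (y : Int) []) (x : Int) 0 -
              PySem.List.pyGetD (PySem.List.pyGetD a (x : Int) []) (y : Int) 0)))
        (x : Int) 0 -
        (PySem.List.pyGetD (PySem.List.pyGetD a (y : Int) []) (x : Int) 0 -
          PySem.List.pyGetD (PySem.List.pyGetD a (x : Int) []) (y : Int) 0))
    = stepB a y d x := by
  simp [stepB, tA, gA, PySem.List.pySetD_natCast, PySem.List.pyGetD_natCast]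

-- f_alt in terms of the defect sums
theorem f_alt_eq_defect (a : List (List Int)) :
    f_alt a = ((List.range a.length).all (fun k => sS a k a.length == 0)) := by
  unfold f_alt
  simp only [PySem.List.pyRange_zero_nat, List.foldl_map]
  simp only [stepB_eq]
  obtain ⟨hlen, hval⟩ := outer_invariant a a.length (le_refl _)
  set D := (List.range a.length).foldl (fun d y => (List.range y).foldl (stepB a y) d)
      (List.replicate a.length (0 : Int)) with hD
  have : (D.any fun v => v != 0) = ((List.range a.length).any
      (fun k => !(sS a k a.length == 0))) := by
    rcases Bool.eq_false_or_eq_true (D.any fun v => v != 0) with h | h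
    · rw [h]
      rw [List.any_eq_true] at h
      obtain ⟨v, hv, hvne⟩ := h
      obtain ⟨k, hk, hkv⟩ := List.getElem_of_mem hv
      symm
      rw [List.any_eq_true]
      refine ⟨k, by simpa using (by omega : k < a.length), ?_⟩
      have : D.getD k 0 = v := by
        simp [List.getD_eq_getElem?_getD, List.getElem?_eq_getElem hk, hkv]
      rw [hval k, if_pos (by omega)] at this
      simp [← this] at hvne ⊢
      exact hvne
    · rw [h]
      rw [List.any_eq_false] at h
      symm
      rw [List.any_eq_false]
      intro k hk
      rw [List.mem_range] at hk
      have hmem : D.getD k 0 ∈ D := by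
        have : k < D.length := by omega
        simp [List.getD_eq_getElem?_getD, List.getElem?_eq_getElem this,
              List.getElem_mem]
      have := h _ hmem
      rw [hval k, if_pos hk] at this
      simpa using this
  rw [this]
  simp [List.all_eq_not_any_not]

-- ===== VERDICT (by name: the statement is the Claim_ definition above) =====
theorem f_spec : Claim_equal_f := by
  intro a _ _
  unfold Spec_f
  rw [f_eq_defect, f_alt_eq_defect]
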